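-- pv_equiv track=rewrite | github.com/mtaufeeq/AlgorithmicToolbox | greedy_algorithms.py | get_optimal_summands
-- ===== SOURCE A (Python) =====
-- def get_optimal_summands(n):
--     """(GreedyAlgorithms, integer) -> list of integers
--
--     Return list of pairwise of distinct positive integers that sum up to n.
--
--     Precondition: 1 <= n <= 10 ** 9
--     """
--     # Idea: greedy approach
--     summands = []
--     l, k = 1, n
--     sum_ = sum(summands)
--
--     while sum_ <= n:
--         if k <= (2*l):
--             summands.append(k)
--             return summands
--
--         summands.append(l)
--         k -= l
--         l += 1
--
--     return summands
-- ===== SOURCE B (Python) =====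
-- import math
--
--
-- def get_optimal_summands(n):
--     """Closed-form version: the greedy loop emits 1, 2, ..., l-1 and folds the
--     remainder into the last element, where l is the largest integer with
--     l*(l+1)//2 <= n.  Compute l directly with an exact integer square root."""
--     if n < 0:
--         return []
--     s = math.isqrt(8 * n + 1)
--     l = (s - 1) // 2
--     return list(range(1, l)) + [n - (l - 1) * l // 2]
-- ===== Notes on version B (the rewrite author's own statement) =====
-- stated objective: alternative
-- what changed: Replaces the greedy subtract-loop by a closed form: the number of full summands is computed directly with an exact integer square root, emitted as a range, and the remainder is folded into the last element.
import Mathlib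
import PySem

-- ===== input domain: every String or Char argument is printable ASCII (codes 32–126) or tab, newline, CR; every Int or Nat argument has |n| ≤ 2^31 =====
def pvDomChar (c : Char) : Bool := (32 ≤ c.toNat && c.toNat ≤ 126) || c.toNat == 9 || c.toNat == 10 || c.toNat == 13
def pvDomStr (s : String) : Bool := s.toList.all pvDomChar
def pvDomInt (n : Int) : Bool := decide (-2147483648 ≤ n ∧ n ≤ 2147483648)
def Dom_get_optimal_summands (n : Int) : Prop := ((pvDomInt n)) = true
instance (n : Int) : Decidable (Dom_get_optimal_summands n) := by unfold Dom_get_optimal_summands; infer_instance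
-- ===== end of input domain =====

-- B replaces A's greedy subtract-loop by a closed form via an exact integer square root (objective: alternative; timing not measurable at the tested sizes).

-- ===== PORT A =====
-- literal port of A's while loop; `sum_` is computed once (sum of the empty list = 0) and never updated, exactly as in the Python
def get_optimal_summands_loop (n sum_ : Int) (summands : List Int) (l k : Int) : List Int :=
  if sum_ ≤ n then
    if k ≤ 2 * l then summands ++ [k]
    else get_optimal_summands_loop n sum_ (summands ++ [l]) (l + 1) (k - l)
  else summands
termination_by ((1 - l).toNat, (k - 2 * l).toNat)
decreasing_by
  refine Prod.lex_iff.mpr ?_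
  by_cases hl : l < 1
  · exact Or.inl (by omega)
  · exact Or.inr ⟨by omega, by omega⟩

def get_optimal_summands (n : Int) : List Int :=
  get_optimal_summands_loop n ([] : List Int).sum [] 1 n

-- ===== PORT B =====
-- math.isqrt ported as Nat.sqrt (exact integer square root)
def get_optimal_summands_alt (n : Int) : List Int :=
  if n < 0 then []
  else
    let s : Int := (Nat.sqrt (8 * n + 1).toNat : Int)
    let l : Int := PySem.Int.floordiv (s - 1) 2
    PySem.List.pyRange 1 l 1 ++ [n - PySem.Int.floordiv ((l - 1) * l) 2]

-- ===== PRECONDITION & SPEC =====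
def Spec_get_optimal_summands (n : Int) (out : List Int) : Prop := out = get_optimal_summands_alt n
instance (n : Int) (out : List Int) : Decidable (Spec_get_optimal_summands n out) := by unfold Spec_get_optimal_summands; infer_instance

-- ===== CLAIM (what is proved, stated in full; the proofs are below) =====
def Claim_equal_get_optimal_summands : Prop := ∀ (n : Int), Dom_get_optimal_summands n → Spec_get_optimal_summands n (get_optimal_summands n)

-- ===== LEMMAS AND PROOFS =====

-- A's loop, started at stage l with remainder k, emits l, l+1, …, L-1 and then the leftover,
-- where L is the largest integer with L*(L+1) ≤ 2*n.
theorem get_optimal_summands_loop_eq (n : Int) (L : Int)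
    (hL1 : L * (L + 1) ≤ 2 * n) (hL2 : 2 * n < (L + 1) * (L + 2)) (hn : 0 ≤ n) :
    ∀ (l : Int) (acc : List Int) (k : Int), 1 ≤ l → l ≤ L → 2 * k = 2 * n - (l - 1) * l →
      get_optimal_summands_loop n 0 acc l k
        = acc ++ PySem.List.pyRange l L 1 ++ [n - PySem.Int.floordiv ((L - 1) * L) 2] := by
  intro l
  induction hw : (L - l).toNat using Nat.strong_induction_on generalizing l with
  | _ m ih =>
    intro acc k hl hlL hk
    rw [get_optimal_summands_loop]
    rcases eq_or_lt_of_le hlL with hEq | hLt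
    · -- last stage: k ≤ 2*l, the loop appends k and stops
      subst hEq
      have hstop : k ≤ 2 * l := by nlinarith
      simp only [hn, if_pos, hstop]
      have hr : PySem.List.pyRange l l 1 = [] := by
        simp
      have hfd : PySem.Int.floordiv ((l - 1) * l) 2 = n - k := by
        rw [PySem.Int.floordiv_eq_ediv_of_pos (by norm_num)]
        omega
      rw [hr, hfd]
      have : k = n - (n - k) := by omega
      simp [← this]
    · -- middle stage: k > 2*l, the loop appends l and continues
      have hgo : ¬ k ≤ 2 * l := by nlinarith
      simp only [hn, if_pos, hgo, if_false]
      rw [ih (L - (l + 1)).toNat (by omega) (l + 1) rfl (acc ++ [l]) (k - l)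
          (by omega) (by omega) (by ring_nf; ring_nf at hk; omega)]
      rw [PySem.List.pyRange_one_cons hLt]
      simp

theorem get_optimal_summands_spec : Claim_equal_get_optimal_summands := by
  intro n _
  show get_optimal_summands n = get_optimal_summands_alt n
  by_cases hn : n < 0
  · rw [get_optimal_summands, get_optimal_summands_loop]
    simp [get_optimal_summands_alt, hn]
  · rw [not_lt] at hn
    have hrhs : get_optimal_summands_alt n
        = PySem.List.pyRange 1 (PySem.Int.floordiv ((Nat.sqrt (8 * n + 1).toNat : Int) - 1) 2) 1
          ++ [n - PySem.Int.floordiv ((PySem.Int.floordiv ((Nat.sqrt (8 * n + 1).toNat : Int) - 1) 2 - 1)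
                * PySem.Int.floordiv ((Nat.sqrt (8 * n + 1).toNat : Int) - 1) 2) 2] := by
      simp [get_optimal_summands_alt, not_lt.mpr hn]
    rw [hrhs]
    set s : Int := (Nat.sqrt (8 * n + 1).toNat : Int) with hs
    set L : Int := PySem.Int.floordiv (s - 1) 2 with hL
    -- isqrt bounds, cast to Int
    have hm : ((8 * n + 1).toNat : Int) = 8 * n + 1 := Int.toNat_of_nonneg (by omega)
    have hsq1 : s * s ≤ 8 * n + 1 := by
      rw [hs, ← hm]; exact_mod_cast Nat.sqrt_le (8 * n + 1).toNat
    have hsq2 : 8 * n + 1 < (s + 1) * (s + 1) := by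
      rw [hs, ← hm]; exact_mod_cast Nat.lt_succ_sqrt (8 * n + 1).toNat
    have hs0 : 0 ≤ s := by rw [hs]; exact_mod_cast Nat.zero_le _
    have hs1 : 1 ≤ s := by nlinarith
    have hLb : 2 * L ≤ s - 1 ∧ s - 1 < 2 * L + 2 := by
      rw [hL, PySem.Int.floordiv_eq_ediv_of_pos (by norm_num)]
      omega
    have hL1 : L * (L + 1) ≤ 2 * n := by nlinarith
    have hL2 : 2 * n < (L + 1) * (L + 2) := by nlinarith
    have hL0 : 0 ≤ L := by omega
    by_cases hn0 : n = 0
    · subst hn0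
      have hLz : L = 0 := by nlinarith [mul_self_nonneg L]
      rw [get_optimal_summands, get_optimal_summands_loop, hLz]
      norm_num [PySem.List.pyRange_one, PySem.Int.floordiv]
    · have hLpos : 1 ≤ L := by
        rcases eq_or_lt_of_le hL0 with h0 | h1
        · exfalso; rw [← h0] at hL2; norm_num at hL2; omega
        · omega
      rw [get_optimal_summands]
      have := get_optimal_summands_loop_eq n L hL1 hL2 hn 1 [] n le_rfl hLpos (by ring)
      simpa using this
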